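-- pv_equiv track=rewrite | github.com/PottierLoic/MineSweeperAI | pattern.py | boardTranslator
-- ===== SOURCE A (Python) =====
-- import copy
--
-- def boardTranslator(board):
--     newBoard=copy.deepcopy(board)
--     lenght=len(board[0])
--     newBoard.insert(0, [])
--     newBoard.append([])
--     for i in range(lenght):
--         newBoard[0].append("!")
--     for i in range(lenght+2):
--         newBoard[-1].append("!")
--     for row in range(len(newBoard)-1):
--         newBoard[row].insert(0, "!")
--         newBoard[row].append("!")
--     return newBoard
-- ===== SOURCE B (Python) =====
-- def boardTranslator(board):
--     n = len(board[0])
--     h = len(board) + 2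
--
--     def width(i):
--         return n + 2 if i == 0 or i == h - 1 else len(board[i - 1]) + 2
--
--     return [["!" if i == 0 or i == h - 1 or j == 0 or j == width(i) - 1
--              else board[i - 1][j - 1]
--              for j in range(width(i))]
--             for i in range(h)]
-- ===== Notes on version B (the rewrite author's own statement) =====
-- stated objective: alternative
-- what changed: B computes every output cell independently from its coordinates (a border predicate plus an index-shifted lookup board[i-1][j-1]) instead of A's staged mutation of a deep copy (insert two empty rows, then three append/insert border-building passes).
import Mathlib
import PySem

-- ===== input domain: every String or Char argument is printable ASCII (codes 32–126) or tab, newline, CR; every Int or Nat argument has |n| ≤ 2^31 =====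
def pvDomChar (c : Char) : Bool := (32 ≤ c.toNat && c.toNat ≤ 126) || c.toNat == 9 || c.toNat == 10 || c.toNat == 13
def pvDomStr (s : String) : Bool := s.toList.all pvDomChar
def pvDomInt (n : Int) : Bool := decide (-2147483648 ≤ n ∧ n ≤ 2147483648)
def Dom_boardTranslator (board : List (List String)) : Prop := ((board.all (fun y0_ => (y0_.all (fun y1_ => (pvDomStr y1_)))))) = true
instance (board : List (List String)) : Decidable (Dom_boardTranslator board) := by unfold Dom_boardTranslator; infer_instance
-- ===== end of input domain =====

-- B computes each output cell independently from its coordinates (border predicate +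
-- index-shifted lookup) instead of A's staged mutation of a deep copy; objective:
-- alternative. A mutates only its deepcopy, so return-value equivalence covers the
-- observable behaviour.

-- ===== PORT A =====
-- Literal transliteration of A. deepcopy of immutable values is the identity; each Python
-- loop is a foldl over the same pyRange, mutating the list with List.modify; all indices
-- used are nonnegative (newBoard[-1] is written as length-1, which Python's -1 denotes).
def boardTranslator (board : List (List String)) : List (List String) :=
  match PySem.List.pyGet? board 0 with
  | none => []  -- board[0] raises IndexError on the empty board; excluded by Pre_
  | some first =>
    let lenght : Int := first.length
    let newBoard := board                       -- newBoard = copy.deepcopy(board)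
    let newBoard := [] :: newBoard              -- newBoard.insert(0, [])
    let newBoard := newBoard ++ [[]]            -- newBoard.append([])
    let newBoard := (PySem.List.pyRange 0 lenght 1).foldl
      (fun b _ => b.modify 0 (fun r => r ++ ["!"])) newBoard
    let newBoard := (PySem.List.pyRange 0 (lenght + 2) 1).foldl
      (fun b _ => b.modify (b.length - 1) (fun r => r ++ ["!"])) newBoard
    (PySem.List.pyRange 0 ((newBoard.length : Int) - 1) 1).foldl
      (fun b row => ((b.modify row.toNat (fun r => "!" :: r)).modify row.toNat
        (fun r => r ++ ["!"]))) newBoard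

-- ===== PORT B =====
-- Literal transliteration of Source B: the nested comprehension becomes nested maps over
-- List.range; board[i-1] / board[i-1][j-1] are taken with getD, which is exact here
-- because in the branches where they are evaluated the indices are in range (1 ≤ i ≤
-- len(board), 1 ≤ j ≤ len(board[i-1])).
def boardTranslator_alt (board : List (List String)) : List (List String) :=
  match PySem.List.pyGet? board 0 with
  | none => []  -- len(board[0]) raises IndexError on the empty board; excluded by Pre_
  | some first =>
    let n := first.length
    let h := board.length + 2
    let width := fun (i : Nat) =>
      if i = 0 || i = h - 1 then n + 2 else (board.getD (i - 1) []).length + 2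
    (List.range h).map (fun i =>
      (List.range (width i)).map (fun j =>
        if i = 0 || i = h - 1 || j = 0 || j = width i - 1 then "!"
        else (board.getD (i - 1) []).getD (j - 1) "!"))

-- ===== PRECONDITION & SPEC =====
-- Pre_ excludes only the empty board, on which A raises IndexError at len(board[0]).
def Pre_boardTranslator (board : List (List String)) : Prop := board ≠ []
instance (board : List (List String)) : Decidable (Pre_boardTranslator board) := by
  unfold Pre_boardTranslator; infer_instance

def pvWitness_boardTranslator : List (List String) := [["0", "1"], ["2", "3"]]

def Spec_boardTranslator (board : List (List String)) (out : List (List String)) : Prop := out = boardTranslator_alt board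
instance (board : List (List String)) (out : List (List String)) : Decidable (Spec_boardTranslator board out) := by unfold Spec_boardTranslator; infer_instance

-- ===== CLAIM (what is proved, stated in full; the proofs are below) =====
def Claim_equal_boardTranslator : Prop := ∀ (board : List (List String)), Dom_boardTranslator board → Pre_boardTranslator board → Spec_boardTranslator board (boardTranslator board)

-- ===== LEMMAS AND PROOFS =====

-- two mutations at the same index fuse
theorem pv_modify_modify {α : Type} (l : List α) (i : Nat) (f g : α → α) :
    (l.modify i f).modify i g = l.modify i (fun x => g (f x)) := by
  induction l generalizing i with
  | nil => simp
  | cons a t ih =>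
    cases i with
    | zero => simp
    | succ j => simp [ih]

-- modify at the index just past a prefix acts on the suffix's head
theorem pv_modify_append {α : Type} (l₁ l₂ : List α) (f : α → α) (i : Nat)
    (hi : i = l₁.length) :
    (l₁ ++ l₂).modify i f = l₁ ++ l₂.modify 0 f := by
  subst hi
  induction l₁ with
  | nil => simp
  | cons a t ih => simp [ih]

-- loop 1: appending "!" to row 0, n times
theorem pv_loop1 (n : Nat) (r : List String) (rest : List (List String)) :
    (PySem.List.pyRange 0 (n : Int) 1).foldl
      (fun b _ => b.modify 0 (fun r => r ++ ["!"])) (r :: rest)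
    = (r ++ List.replicate n "!") :: rest := by
  induction n with
  | zero => simp [PySem.List.pyRange_one_eq_nil]
  | succ m ih =>
    have h : PySem.List.pyRange 0 ((m + 1 : Nat) : Int) 1
        = PySem.List.pyRange 0 (m : Int) 1 ++ [(m : Int)] := by
      have := PySem.List.pyRange_one_succ_right (a := 0) (b := (m : Int)) (by positivity)
      simpa [Int.natCast_succ] using this
    rw [h, List.foldl_append, ih]
    simp [List.replicate_succ']

-- loop 2: appending "!" to the last row, n times
theorem pv_loop2 (n : Nat) (init : List (List String)) (r : List String) :
    (PySem.List.pyRange 0 (n : Int) 1).foldl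
      (fun b _ => b.modify (b.length - 1) (fun r => r ++ ["!"])) (init ++ [r])
    = init ++ [r ++ List.replicate n "!"] := by
  induction n with
  | zero => simp [PySem.List.pyRange_one_eq_nil]
  | succ m ih =>
    have h : PySem.List.pyRange 0 ((m + 1 : Nat) : Int) 1
        = PySem.List.pyRange 0 (m : Int) 1 ++ [(m : Int)] := by
      have := PySem.List.pyRange_one_succ_right (a := 0) (b := (m : Int)) (by positivity)
      simpa [Int.natCast_succ] using this
    rw [h, List.foldl_append, ih]
    simp only [List.foldl_cons, List.foldl_nil]
    rw [pv_modify_append init _ _ _ (by simp)]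
    simp [List.replicate_succ']

-- loop 3: framing each of the first m rows with "!" on both sides
theorem pv_loop3 (m : Nat) (s : List (List String)) (hm : m ≤ s.length) :
    (PySem.List.pyRange 0 (m : Int) 1).foldl
      (fun b row => ((b.modify row.toNat (fun r => "!" :: r)).modify row.toNat
        (fun r => r ++ ["!"]))) s
    = (s.take m).map (fun r => "!" :: r ++ ["!"]) ++ s.drop m := by
  induction m with
  | zero => simp [PySem.List.pyRange_one_eq_nil]
  | succ k ih =>
    have hk : k ≤ s.length := Nat.le_of_succ_le hm
    have hklt : k < s.length := hm
    have h : PySem.List.pyRange 0 ((k + 1 : Nat) : Int) 1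
        = PySem.List.pyRange 0 (k : Int) 1 ++ [(k : Int)] := by
      have := PySem.List.pyRange_one_succ_right (a := 0) (b := (k : Int)) (by positivity)
      simpa [Int.natCast_succ] using this
    rw [h, List.foldl_append, ih hk]
    simp only [List.foldl_cons, List.foldl_nil]
    rw [pv_modify_modify]
    have hdrop : s.drop k = s[k] :: s.drop (k + 1) := List.drop_eq_getElem_cons hklt
    have hlen : ((s.take k).map (fun r => "!" :: r ++ ["!"])).length = k := by
      simp [List.length_take, Nat.min_eq_left hk]
    rw [hdrop, show ((k : Int)).toNat = k from rfl,
      pv_modify_append _ _ _ _ hlen.symm]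
    have htake : s.take (k + 1) = s.take k ++ [s[k]] := by
      rw [List.take_add_one, List.getElem?_eq_getElem hklt]; rfl
    rw [show ((s[k] :: List.drop (k + 1) s).modify 0 (fun x => "!" :: x ++ ["!"]))
        = ("!" :: s[k] ++ ["!"]) :: List.drop (k + 1) s from List.modify_zero_cons _ _ _, htake]
    simp
    rw [List.take_add_one]
    simp [List.getElem?_eq_getElem hklt]

-- A's result in canonical form
theorem pv_A_canon (hd : List String) (tl : List (List String)) :
    boardTranslator (hd :: tl)
    = List.replicate (hd.length + 2) "!"
        :: (hd :: tl).map (fun r => "!" :: r ++ ["!"])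
        ++ [List.replicate (hd.length + 2) "!"] := by
  have hget : PySem.List.pyGet? (hd :: tl) 0 = some hd := by
    simp [PySem.List.pyGet?, PySem.List.pyIdx?]
  set n := hd.length with hn
  unfold boardTranslator
  rw [hget]
  simp only
  rw [show ((hd.length : Int)) = ((n : Nat) : Int) from rfl]
  rw [show ([] :: (hd :: tl) ++ [([] : List String)])
      = ([] : List String) :: (hd :: (tl ++ [[]])) from by simp]
  rw [pv_loop1 n [] (hd :: (tl ++ [[]]))]
  rw [show ((n : Int) + 2) = (((n + 2 : Nat)) : Int) from by push_cast; ring]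
  rw [show (([] ++ List.replicate n "!") :: hd :: (tl ++ [([] : List String)]))
      = ((List.replicate n "!" :: hd :: tl) ++ [([] : List String)]) from by simp]
  rw [pv_loop2 (n + 2) (List.replicate n "!" :: hd :: tl) []]
  have hlen3 : (((List.replicate n "!" :: hd :: tl)
      ++ [[] ++ List.replicate (n + 2) "!"]).length : Int) - 1
      = (((tl.length + 2 : Nat)) : Int) := by
    simp; ring
  rw [hlen3, pv_loop3 (tl.length + 2) _ (by simp)]
  have htake : ((List.replicate n "!" :: hd :: tl)
      ++ [[] ++ List.replicate (n + 2) "!"]).take (tl.length + 2)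
      = List.replicate n "!" :: hd :: tl := by
    rw [show (tl.length + 2) = (List.replicate n "!" :: hd :: tl).length from by simp]
    exact List.take_left
  have hdrop : ((List.replicate n "!" :: hd :: tl)
      ++ [[] ++ List.replicate (n + 2) "!"]).drop (tl.length + 2)
      = [[] ++ List.replicate (n + 2) "!"] := by
    rw [show (tl.length + 2) = (List.replicate n "!" :: hd :: tl).length from by simp]
    exact List.drop_left
  rw [htake, hdrop]
  have hborder : ("!" :: List.replicate n "!") ++ ["!"] = List.replicate (n + 2) "!" := by
    rw [← List.replicate_succ, ← List.replicate_succ']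
  simp only [List.map_cons]
  rw [hborder]
  simp [hn]

-- one interior row of B's grid is the framed source row
theorem pv_row (r : List String) :
    (List.range (r.length + 2)).map
      (fun j => if j = 0 || j = r.length + 2 - 1 then "!" else r.getD (j - 1) "!")
    = "!" :: r ++ ["!"] := by
  apply List.ext_getElem (by simp)
  intro j h1 h2
  simp only [List.getElem_map, List.getElem_range]
  simp only [List.length_map, List.length_range] at h1
  by_cases hj0 : j = 0
  · subst hj0; simp
  · by_cases hjl : j = r.length + 1
    · subst hjl
      rw [if_pos (by simp)]
      simp
    · rw [if_neg (by simp [hj0]; omega)]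
      obtain ⟨k, rfl⟩ : ∃ k, j = k + 1 := ⟨j - 1, by omega⟩
      have hk' : k < r.length := by omega
      simp only [Nat.add_sub_cancel]
      rw [List.getD_eq_getElem r _ hk']
      simp [List.getElem_append_left hk']

-- B's result in canonical form
theorem pv_B_canon (hd : List String) (tl : List (List String)) :
    boardTranslator_alt (hd :: tl)
    = List.replicate (hd.length + 2) "!"
        :: (hd :: tl).map (fun r => "!" :: r ++ ["!"])
        ++ [List.replicate (hd.length + 2) "!"] := by
  have hget : PySem.List.pyGet? (hd :: tl) 0 = some hd := by
    simp [PySem.List.pyGet?, PySem.List.pyIdx?]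
  unfold boardTranslator_alt
  rw [hget]
  show (List.range ((hd :: tl).length + 2)).map (fun i =>
      (List.range (if i = 0 || i = (hd :: tl).length + 2 - 1 then hd.length + 2
          else ((hd :: tl).getD (i - 1) []).length + 2)).map (fun j =>
        if i = 0 || i = (hd :: tl).length + 2 - 1 || j = 0
           || j = (if i = 0 || i = (hd :: tl).length + 2 - 1 then hd.length + 2
                   else ((hd :: tl).getD (i - 1) []).length + 2) - 1 then "!"
        else ((hd :: tl).getD (i - 1) []).getD (j - 1) "!"))
    = _
  generalize hbd : hd :: tl = bd
  have hL : bd.length = tl.length + 1 := by rw [← hbd]; simp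
  rw [show bd.length + 2 = (bd.length + 1) + 1 from rfl, List.range_succ,
    List.range_succ_eq_map]
  simp only [List.map_append, List.map_cons, List.map_nil, List.map_map]
  refine congrArg₂ List.cons ?_ (congrArg₂ (· ++ ·) ?_ (congrArg (fun x => [x]) ?_))
  · -- top border row
    simp
  · -- interior rows
    apply List.ext_getElem (by simp)
    intro k hk1 hk2
    simp only [List.getElem_map, List.getElem_range, Function.comp_apply]
    simp only [List.length_map, List.length_range] at hk1
    have hne1 : ¬ (k + 1 = 0) := by omega
    have hne2 : ¬ (k + 1 = bd.length + 1) := by omega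
    have hrow : bd.getD k [] = bd[k] := List.getD_eq_getElem bd _ hk1
    simp only [Nat.succ_eq_add_one, Nat.add_sub_cancel, hne1, hne2, decide_false,
      Bool.false_or, Bool.false_eq_true, if_false, hrow]
    exact pv_row bd[k]
  · -- bottom border row
    simp

-- ===== VERDICT (by name: the statement is the Claim_ definition above) =====
theorem boardTranslator_spec : Claim_equal_boardTranslator := by
  intro board _ hpre
  obtain ⟨hd, tl, rfl⟩ := List.exists_cons_of_ne_nil hpre
  show boardTranslator (hd :: tl) = boardTranslator_alt (hd :: tl)
  rw [pv_A_canon, pv_B_canon]
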